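-- pv_equiv track=rewrite | github.com/mbus/m3-python | m3/m3_common.py | build_injection_message_mbus
-- ===== SOURCE A (Python) =====
-- def build_injection_message_mbus(mbus_addr, mbus_data, run_after=False):
--     chip_id_mask = 0                # [0:3] Chip ID Mask
--     reset = 0                       #   [4] Reset Request
--     chip_id_coding = 0              #   [5] Chip ID coding
--     is_i2c = 1                      #   [6] Indicates transmission is I2C message [addr+data]
--     run_after = not not run_after   #   [7] Run code after programming?
--     # Byte 0: Control
--     control = chip_id_mask | (reset << 4) | (chip_id_coding << 5) | (is_i2c << 6) | (run_after << 7)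
--
--     # Byte 1,2: Chip ID
--     chip_id = 0
--
--     # Byte 3,4,5,6: MBus Address
--     i2c_addr = mbus_addr
--
--     # Byte 7,8,9,10: MBus Data
--     i2c_data = mbus_data
--
--     # Byte 11: bit-wise XOR parity of header
--     header_parity = 0
--     for byte in (
--             control,
--             (chip_id >> 8) & 0xff,
--             chip_id & 0xff,
--             (i2c_addr >> 24) & 0xff,
--             (i2c_addr >> 16) & 0xff,
--             (i2c_addr >> 8) & 0xff,
--             i2c_addr & 0xff,
--             (i2c_data >> 24) & 0xff,
--             (i2c_data >> 16) & 0xff,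
--             (i2c_data >> 8) & 0xff,
--             i2c_data & 0xff,
--             ):
--         header_parity ^= byte
--
--     # Assemble message:
--     message = "%02X%04X%08X%08X%02X" % (
--             control,
--             chip_id,
--             i2c_addr,
--             i2c_data,
--             header_parity)
--
--     return message
-- ===== SOURCE B (Python) =====
-- def build_injection_message_mbus(mbus_addr, mbus_data, run_after=False):
--     # Byte 0: Control (chip_id_mask=0, reset=0, chip_id_coding=0, is_i2c=1)
--     control = 0x40 | (0x80 if run_after else 0)
--
--     # Closed-form XOR parity of the four low bytes of a 32-bit word:
--     # fold the masked word onto its low byte with two shift-XOR steps.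
--     def fold32(x):
--         y = x & 0xFFFFFFFF
--         y ^= y >> 16
--         return (y ^ (y >> 8)) & 0xFF
--
--     # chip_id is 0, so its bytes drop out of the parity.
--     header_parity = control ^ fold32(mbus_addr) ^ fold32(mbus_data)
--
--     return "%02X%04X%08X%08X%02X" % (control, 0, mbus_addr, mbus_data, header_parity)
-- ===== Notes on version B (the rewrite author's own statement) =====
-- stated objective: alternative
-- what changed: The 11-element byte-list XOR loop is replaced by a closed-form shift-XOR parity fold (y=x&0xFFFFFFFF; y^=y>>16; (y^(y>>8))&0xFF) applied to the two 32-bit words, with the zero chip_id bytes dropped; the control byte becomes a single 0x40|0x80 expression and the format string is unchanged.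
import Mathlib
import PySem

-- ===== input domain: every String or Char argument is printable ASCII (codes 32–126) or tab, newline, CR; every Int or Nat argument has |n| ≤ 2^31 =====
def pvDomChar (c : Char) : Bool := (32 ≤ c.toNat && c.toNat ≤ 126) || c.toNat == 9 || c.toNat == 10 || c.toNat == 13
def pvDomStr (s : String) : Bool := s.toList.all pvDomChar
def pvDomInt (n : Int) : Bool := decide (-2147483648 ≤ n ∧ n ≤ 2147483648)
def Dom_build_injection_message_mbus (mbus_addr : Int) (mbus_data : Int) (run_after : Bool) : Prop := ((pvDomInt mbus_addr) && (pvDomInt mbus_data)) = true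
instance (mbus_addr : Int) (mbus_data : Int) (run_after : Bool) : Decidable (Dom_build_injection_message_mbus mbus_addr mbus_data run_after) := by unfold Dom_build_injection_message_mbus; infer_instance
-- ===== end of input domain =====

-- B replaces A's 11-byte XOR loop by a closed-form shift-XOR parity fold of the two
-- 32-bit words (objective: alternative algorithm of the same cost); formatting unchanged.

-- Shared formatting helpers: hand-written port of Python's "%0<w>X" % n (PySem has no
-- hex formatter). Exact for every int n: upper-case hex digits of |n|, zero-padded so
-- the whole field (including a leading '-' for negative n) has at least w characters.
def pvHexDigitChar (n : Nat) : Char :=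
  if n < 10 then Char.ofNat (48 + n) else Char.ofNat (55 + n)

def pvHexDigits (n : Nat) : List Char :=
  if _h : n < 16 then [pvHexDigitChar n]
  else pvHexDigits (n / 16) ++ [pvHexDigitChar (n % 16)]
  decreasing_by exact Nat.div_lt_self (by omega) (by omega)

def pvHexPad (n : Int) (w : Nat) : String :=
  if n < 0 then
    let ds := pvHexDigits n.natAbs
    String.mk ('-' :: (List.replicate (w - 1 - ds.length) '0' ++ ds))
  else
    let ds := pvHexDigits n.toNat
    String.mk (List.replicate (w - ds.length) '0' ++ ds)

-- ===== PORT A =====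
def build_injection_message_mbus (mbus_addr : Int) (mbus_data : Int) (run_after : Bool) : String :=
  -- control = chip_id_mask | (reset << 4) | (chip_id_coding << 5) | (is_i2c << 6) | (run_after << 7)
  let control : Int :=
    PySem.Int.bor (PySem.Int.bor (PySem.Int.bor (PySem.Int.bor 0 ((0:Int) <<< (4:Nat))) ((0:Int) <<< (5:Nat)))
      ((1:Int) <<< (6:Nat))) ((if run_after then (1:Int) else 0) <<< (7:Nat))
  let chip_id : Int := 0
  let i2c_addr : Int := mbus_addr
  let i2c_data : Int := mbus_data
  -- for byte in (...): header_parity ^= byte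
  let header_parity : Int :=
    ([control,
      PySem.Int.band (chip_id >>> (8:Nat)) 255, PySem.Int.band chip_id 255,
      PySem.Int.band (i2c_addr >>> (24:Nat)) 255, PySem.Int.band (i2c_addr >>> (16:Nat)) 255,
      PySem.Int.band (i2c_addr >>> (8:Nat)) 255, PySem.Int.band i2c_addr 255,
      PySem.Int.band (i2c_data >>> (24:Nat)) 255, PySem.Int.band (i2c_data >>> (16:Nat)) 255,
      PySem.Int.band (i2c_data >>> (8:Nat)) 255, PySem.Int.band i2c_data 255]).foldl
      (fun acc byte => PySem.Int.bxor acc byte) 0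
  pvHexPad control 2 ++ pvHexPad chip_id 4 ++ pvHexPad i2c_addr 8 ++ pvHexPad i2c_data 8 ++
    pvHexPad header_parity 2

-- ===== PORT B =====
-- fold32(x): y = x & 0xFFFFFFFF; y ^= y >> 16; return (y ^ (y >> 8)) & 0xFF
def pvFold32 (x : Int) : Int :=
  let y := PySem.Int.band x 4294967295
  let y := PySem.Int.bxor y (y >>> (16:Nat))
  PySem.Int.band (PySem.Int.bxor y (y >>> (8:Nat))) 255

def build_injection_message_mbus_alt (mbus_addr : Int) (mbus_data : Int) (run_after : Bool) : String :=
  let control : Int := PySem.Int.bor 64 (if run_after then 128 else 0)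
  let header_parity : Int :=
    PySem.Int.bxor (PySem.Int.bxor control (pvFold32 mbus_addr)) (pvFold32 mbus_data)
  pvHexPad control 2 ++ pvHexPad 0 4 ++ pvHexPad mbus_addr 8 ++ pvHexPad mbus_data 8 ++
    pvHexPad header_parity 2

-- ===== PRECONDITION & SPEC =====
def Spec_build_injection_message_mbus (mbus_addr : Int) (mbus_data : Int) (run_after : Bool) (out : String) : Prop := out = build_injection_message_mbus_alt mbus_addr mbus_data run_after
instance (mbus_addr : Int) (mbus_data : Int) (run_after : Bool) (out : String) : Decidable (Spec_build_injection_message_mbus mbus_addr mbus_data run_after out) := by unfold Spec_build_injection_message_mbus; infer_instance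

-- ===== CLAIM (what is proved, stated in full; the proofs are below) =====
def Claim_equal_build_injection_message_mbus : Prop := ∀ (mbus_addr : Int) (mbus_data : Int) (run_after : Bool), Dom_build_injection_message_mbus mbus_addr mbus_data run_after → Spec_build_injection_message_mbus mbus_addr mbus_data run_after (build_injection_message_mbus mbus_addr mbus_data run_after)

-- ===== LEMMAS AND PROOFS =====

-- Nat-level parity core: B's shift fold equals the XOR of the four low bytes.
def pvF0 (m : Nat) : Nat := ((m ^^^ m >>> 16) ^^^ (m ^^^ m >>> 16) >>> 8) &&& 255

lemma pv_t255 (i : Nat) : Nat.testBit 255 i = decide (i < 8) := by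
  have h : (255 : Nat) = 2^8 - 1 := by norm_num
  rw [h, Nat.testBit_two_pow_sub_one]

lemma pv_tM (i : Nat) : Nat.testBit 4294967295 i = decide (i < 32) := by
  have h : (4294967295 : Nat) = 2^32 - 1 := by norm_num
  rw [h, Nat.testBit_two_pow_sub_one]

lemma pvGpos (n : Nat) : pvF0 (n &&& 4294967295) =
    (((n >>> 24) &&& 255) ^^^ ((n >>> 16) &&& 255)) ^^^ (((n >>> 8) &&& 255) ^^^ (n &&& 255)) := by
  apply Nat.eq_of_testBit_eq
  intro i
  simp only [pvF0, Nat.testBit_and, Nat.testBit_xor, Nat.testBit_shiftRight, pv_t255, pv_tM]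
  by_cases h : i < 8
  · simp [h, show (16:Nat)+(8+i) = 24+i by omega, show 16+i < 32 by omega, show 8+i < 32 by omega,
      show 24+i < 32 by omega, show i < 32 by omega]
    cases n.testBit i <;> cases n.testBit (16+i) <;> cases n.testBit (8+i) <;>
      cases n.testBit (24+i) <;> simp
  · simp [h]

lemma pv_sub_mask (w s : Nat) (h : s < 2^w) : 2^w - 1 - s = (2^w - 1) ^^^ s := by
  have h2 : (~~~(BitVec.ofNat w s)) = (BitVec.allOnes w) ^^^ (BitVec.ofNat w s) := by ext i; simp
  have h1 : (~~~(BitVec.ofNat w s)).toNat = 2^w - 1 - s := by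
    rw [BitVec.toNat_not, BitVec.toNat_ofNat, Nat.mod_eq_of_lt h]
  rw [← h1, h2, BitVec.toNat_xor, BitVec.toNat_allOnes, BitVec.toNat_ofNat, Nat.mod_eq_of_lt h]

lemma pvGneg (n : Nat) : pvF0 (4294967295 - (4294967295 &&& n)) =
    ((255 - (255 &&& (n >>> 24))) ^^^ (255 - (255 &&& (n >>> 16)))) ^^^
    ((255 - (255 &&& (n >>> 8))) ^^^ (255 - (255 &&& n))) := by
  have e1 : (4294967295:Nat) - (4294967295 &&& n) = 4294967295 ^^^ (4294967295 &&& n) := by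
    have h := pv_sub_mask 32 (4294967295 &&& n)
      (by have := Nat.and_le_left (n := 4294967295) (m := n); norm_num at this ⊢; omega)
    norm_num at h ⊢; exact h
  have e2 : ∀ m : Nat, (255:Nat) - (255 &&& m) = 255 ^^^ (255 &&& m) := by
    intro m
    have h := pv_sub_mask 8 (255 &&& m)
      (by have := Nat.and_le_left (n := 255) (m := m); norm_num at this ⊢; omega)
    norm_num at h ⊢; exact h
  rw [e1, e2, e2, e2, e2]
  apply Nat.eq_of_testBit_eq
  intro i
  simp only [pvF0, Nat.testBit_and, Nat.testBit_xor, Nat.testBit_shiftRight, pv_t255, pv_tM]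
  by_cases h : i < 8
  · simp [h, show (16:Nat)+(8+i) = 24+i by omega, show 16+i < 32 by omega, show 8+i < 32 by omega,
      show 24+i < 32 by omega, show i < 32 by omega]
    cases n.testBit i <;> cases n.testBit (16+i) <;> cases n.testBit (8+i) <;>
      cases n.testBit (24+i) <;> simp
  · simp [h]

-- Int → Nat bridges
def pvByte (x : Int) (k : Nat) : Nat :=
  match x with
  | .ofNat n => (n >>> k) &&& 255
  | .negSucc n => 255 - (255 &&& (n >>> k))

lemma pv_band255_negSucc (m : Nat) :
    PySem.Int.band (Int.negSucc m) 255 = ((255 - (255 &&& m) : Nat) : Int) := by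
  simp [PySem.Int.band, Int.negSucc_not_nonneg]

lemma pv_byte_eq (x : Int) (k : Nat) :
    PySem.Int.band (x >>> k) 255 = ((pvByte x k : Nat) : Int) := by
  cases x with
  | ofNat n =>
      have h : (Int.ofNat n) >>> k = ((n >>> k : Nat) : Int) := by
        simpa using (Int.natCast_shiftRight n k).symm
      rw [h]
      simpa [pvByte] using PySem.Int.band_natCast (n >>> k) 255
  | negSucc n =>
      have h : (Int.negSucc n) >>> k = Int.negSucc (n >>> k) := rfl
      rw [h, pv_band255_negSucc]
      rfl

lemma pv_byte0_eq (x : Int) : PySem.Int.band x 255 = ((pvByte x 0 : Nat) : Int) := by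
  cases x with
  | ofNat n => simpa [pvByte] using PySem.Int.band_natCast n 255
  | negSucc n => rw [pv_band255_negSucc]; simp [pvByte]

lemma pv_bandM_negSucc (m : Nat) :
    PySem.Int.band (Int.negSucc m) 4294967295 = ((4294967295 - (4294967295 &&& m) : Nat) : Int) := by
  simp [PySem.Int.band, Int.negSucc_not_nonneg]

lemma pv_fold32_eq (x : Int) :
    pvFold32 x = (((pvByte x 24 ^^^ pvByte x 16) ^^^ (pvByte x 8 ^^^ pvByte x 0) : Nat) : Int) := by
  have hb255 : ∀ m : Nat, PySem.Int.band ((m : Nat) : Int) 255 = ((m &&& 255 : Nat) : Int) :=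
    fun m => by simpa using PySem.Int.band_natCast m 255
  cases x with
  | ofNat n =>
      have hb : PySem.Int.band (Int.ofNat n) 4294967295 = ((n &&& 4294967295 : Nat) : Int) := by
        simpa using PySem.Int.band_natCast n 4294967295
      simp only [pvFold32, hb, ← Int.natCast_shiftRight, PySem.Int.bxor_natCast, hb255, pvByte]
      have h := pvGpos n
      simp only [pvF0] at h
      exact_mod_cast h
  | negSucc n =>
      simp only [pvFold32, pv_bandM_negSucc, ← Int.natCast_shiftRight, PySem.Int.bxor_natCast,
        hb255, pvByte]
      have h := pvGneg n
      simp only [pvF0] at h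
      exact_mod_cast h

-- Reassociation of the XOR chain over nonnegative (Nat-cast) atoms.
lemma pv_chain (c a3 a2 a1 a0 d3 d2 d1 d0 : Nat) :
    PySem.Int.bxor (PySem.Int.bxor (PySem.Int.bxor (PySem.Int.bxor (PySem.Int.bxor
      (PySem.Int.bxor (PySem.Int.bxor (PySem.Int.bxor (PySem.Int.bxor (PySem.Int.bxor
      (PySem.Int.bxor 0 ((c : Nat) : Int)) ((0 : Nat) : Int)) ((0 : Nat) : Int))
      ((a3 : Nat) : Int)) ((a2 : Nat) : Int)) ((a1 : Nat) : Int)) ((a0 : Nat) : Int))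
      ((d3 : Nat) : Int)) ((d2 : Nat) : Int)) ((d1 : Nat) : Int)) ((d0 : Nat) : Int)
    = PySem.Int.bxor (PySem.Int.bxor ((c : Nat) : Int)
        (((a3 ^^^ a2) ^^^ (a1 ^^^ a0) : Nat) : Int)) (((d3 ^^^ d2) ^^^ (d1 ^^^ d0) : Nat) : Int) := by
  have h0 : (0 : Int) = ((0 : Nat) : Int) := rfl
  rw [h0]
  simp only [PySem.Int.bxor_natCast, Nat.cast_inj]
  simp [Nat.xor_comm, Nat.xor_left_comm]

-- ===== VERDICT (by name: the statement is the Claim_ definition above) =====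
theorem build_injection_message_mbus_spec : Claim_equal_build_injection_message_mbus := by
  intro a d r _
  unfold Spec_build_injection_message_mbus
  unfold build_injection_message_mbus build_injection_message_mbus_alt
  cases r with
  | false =>
      simp only [List.foldl, pv_fold32_eq, pv_byte_eq]
      simp only [pv_byte0_eq]
      rw [show PySem.Int.bor (PySem.Int.bor (PySem.Int.bor (PySem.Int.bor 0 ((0:Int) <<< (4:Nat)))
            ((0:Int) <<< (5:Nat))) ((1:Int) <<< (6:Nat)))
            ((if (false : Bool) then (1:Int) else 0) <<< (7:Nat)) = ((64 : Nat) : Int) from by decide,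
          show PySem.Int.bor 64 (if (false : Bool) then (128:Int) else 0) = ((64 : Nat) : Int)
            from by decide,
          show pvByte (0 : Int) 8 = (0 : Nat) from by decide,
          show pvByte (0 : Int) 0 = (0 : Nat) from by decide,
          pv_chain]
  | true =>
      simp only [List.foldl, pv_fold32_eq, pv_byte_eq]
      simp only [pv_byte0_eq, if_true]
      rw [show PySem.Int.bor (PySem.Int.bor (PySem.Int.bor (PySem.Int.bor 0 ((0:Int) <<< (4:Nat)))
            ((0:Int) <<< (5:Nat))) ((1:Int) <<< (6:Nat)))
            ((1:Int) <<< (7:Nat)) = ((192 : Nat) : Int) from by decide,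
          show PySem.Int.bor 64 (128:Int) = ((192 : Nat) : Int)
            from by decide,
          show pvByte (0 : Int) 8 = (0 : Nat) from by decide,
          show pvByte (0 : Int) 0 = (0 : Nat) from by decide,
          pv_chain]
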